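-- pv_equiv track=rewrite | github.com/orchagent/agents-by-orchagent | code-stats/main.py | _find_python_function_end
-- ===== SOURCE A (Python) =====
-- def _find_python_function_end(lines: list[str], start_idx: int, func_indent: int) -> int:
--     """Find the last line belonging to a Python function using indentation.
--
--     Args:
--         lines: All source lines (0-indexed).
--         start_idx: Index of the ``def`` line.
--         func_indent: Column of the ``def`` keyword.
--
--     Returns:
--         0-based index of the last line that belongs to the function body.
--     """
--     last_body_line = start_idx  # at minimum the def line itself
--     for j in range(start_idx + 1, len(lines)):
--         stripped = lines[j].strip()
--         if not stripped:
--             # Blank lines don't end a function – but only count them if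
--             # there is still body content after them.
--             continue
--         # Measure leading whitespace
--         leading = len(lines[j]) - len(lines[j].lstrip())
--         if leading > func_indent:
--             # Still inside the function body
--             last_body_line = j
--         else:
--             # Dedented to the same or outer level → function ended
--             break
--     else:
--         # Reached end of file while inside the function
--         # Walk back from EOF to find the last non-blank line
--         for j in range(len(lines) - 1, start_idx, -1):
--             if lines[j].strip():
--                 last_body_line = j
--                 break
--     return last_body_line
-- ===== SOURCE B (Python) =====
-- def _find_python_function_end(lines: list[str], start_idx: int, func_indent: int) -> int:
--     """Boundary-then-trim decomposition: find the dedent boundary first,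
--     then take the last non-blank line before it."""
--     n = len(lines)
--     # Phase 1: boundary = first non-blank line at or above func_indent's level
--     end = n
--     for j in range(start_idx + 1, n):
--         line = lines[j]
--         if line.strip() and len(line) - len(line.lstrip()) <= func_indent:
--             end = j
--             break
--     # Phase 2: last non-blank line strictly before the boundary
--     last = start_idx
--     for j in range(start_idx + 1, end):
--         if lines[j].strip():
--             last = j
--     return last
-- ===== Notes on version B (the rewrite author's own statement) =====
-- stated objective: alternative
-- what changed: Replaces A's single tracking loop with for-else EOF walk-back by a two-phase boundary-then-trim decomposition: first find the dedent boundary (first non-blank line indented <= func_indent, default EOF), then take the last non-blank line before it.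
import Mathlib
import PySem

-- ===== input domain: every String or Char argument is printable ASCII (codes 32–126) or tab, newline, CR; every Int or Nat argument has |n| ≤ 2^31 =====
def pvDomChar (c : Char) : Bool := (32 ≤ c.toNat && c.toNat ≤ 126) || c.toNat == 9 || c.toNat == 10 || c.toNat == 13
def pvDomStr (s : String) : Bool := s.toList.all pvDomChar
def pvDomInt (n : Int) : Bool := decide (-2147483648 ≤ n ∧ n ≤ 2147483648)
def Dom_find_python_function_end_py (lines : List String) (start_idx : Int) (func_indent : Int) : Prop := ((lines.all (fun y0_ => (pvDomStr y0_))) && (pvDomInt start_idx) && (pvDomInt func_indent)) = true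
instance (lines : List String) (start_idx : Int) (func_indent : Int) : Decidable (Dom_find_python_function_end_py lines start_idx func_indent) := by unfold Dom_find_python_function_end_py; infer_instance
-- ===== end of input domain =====

-- B replaces A's single tracking loop + for-else walk-back by a boundary-then-trim
-- decomposition (find the dedent boundary, then the last non-blank line before it);
-- objective: alternative decomposition, same cost.

-- shared low-level primitives (both Pythons evaluate exactly these expressions)
def pvLine (lines : List String) (j : Int) : String := (PySem.List.pyGet? lines j).getD ""
def pvBlank (line : String) : Bool := PySem.Chars.strip line.toList == []
def pvLeading (line : String) : Int := (line.toList.length : Int) - ((PySem.Chars.lstrip line.toList).length : Int)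

-- ===== PORT A =====
-- A's main for-loop; result (last_body_line, broke?)
def pvA_loop (lines : List String) (fi : Int) : List Int → Int → Int × Bool
  | [], last => (last, false)
  | j :: rest, last =>
    let line := pvLine lines j
    if pvBlank line then pvA_loop lines fi rest last
    else if pvLeading line > fi then pvA_loop lines fi rest j
    else (last, true)

-- A's for-else walk-back from EOF
def pvA_back (lines : List String) : List Int → Int → Int
  | [], last => last
  | j :: rest, last =>
    if !(pvBlank (pvLine lines j)) then j else pvA_back lines rest last

def find_python_function_end_py (lines : List String) (start_idx : Int) (func_indent : Int) : Int :=
  match pvA_loop lines func_indent (PySem.List.pyRange (start_idx + 1) (lines.length : Int) 1) start_idx with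
  | (last, true) => last
  | (last, false) => pvA_back lines (PySem.List.pyRange ((lines.length : Int) - 1) start_idx (-1)) last

-- ===== PORT B =====
-- phase 1: first non-blank line dedented to ≤ func_indent, default n
def pvB_end (lines : List String) (fi n : Int) : List Int → Int
  | [] => n
  | j :: rest =>
    let line := pvLine lines j
    if !(pvBlank line) && pvLeading line ≤ fi then j else pvB_end lines fi n rest

-- phase 2: last non-blank index in the region, default the accumulator
def pvB_last (lines : List String) : List Int → Int → Int
  | [], last => last
  | j :: rest, last => pvB_last lines rest (if !(pvBlank (pvLine lines j)) then j else last)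

def find_python_function_end_py_alt (lines : List String) (start_idx : Int) (func_indent : Int) : Int :=
  let n : Int := lines.length
  let e := pvB_end lines func_indent n (PySem.List.pyRange (start_idx + 1) n 1)
  pvB_last lines (PySem.List.pyRange (start_idx + 1) e 1) start_idx

-- ===== PRECONDITION & SPEC =====
-- Pre_ excludes exactly the inputs where Python raises IndexError: both A and B
-- index lines[j] for j from start_idx+1, which wraps below -len(lines).
def Pre_find_python_function_end_py (lines : List String) (start_idx : Int) (func_indent : Int) : Prop :=
  -((lines.length : Int) + 1) ≤ start_idx
instance (lines : List String) (start_idx : Int) (func_indent : Int) : Decidable (Pre_find_python_function_end_py lines start_idx func_indent) := by unfold Pre_find_python_function_end_py; infer_instance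

def pvWitness_find_python_function_end_py : List String × Int × Int :=
  (["def f():", "    return 1", "", "x = 2"], 0, 0)

def Spec_find_python_function_end_py (lines : List String) (start_idx : Int) (func_indent : Int) (out : Int) : Prop := out = find_python_function_end_py_alt lines start_idx func_indent
instance (lines : List String) (start_idx : Int) (func_indent : Int) (out : Int) : Decidable (Spec_find_python_function_end_py lines start_idx func_indent out) := by unfold Spec_find_python_function_end_py; infer_instance

-- ===== CLAIM (what is proved, stated in full; the proofs are below) =====
def Claim_equal_find_python_function_end_py : Prop := ∀ (lines : List String) (start_idx : Int) (func_indent : Int), Dom_find_python_function_end_py lines start_idx func_indent → Pre_find_python_function_end_py lines start_idx func_indent → Spec_find_python_function_end_py lines start_idx func_indent (find_python_function_end_py lines start_idx func_indent)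

-- ===== LEMMAS AND PROOFS =====

-- "j is a dedent boundary line": non-blank with indentation ≤ fi
def pvShallow (lines : List String) (fi : Int) (j : Int) : Bool :=
  !(pvBlank (pvLine lines j)) && decide (pvLeading (pvLine lines j) ≤ fi)

-- A's loop on a shallow-free index list completes without break, tracking the last non-blank
theorem pvA_loop_no_shallow (lines : List String) (fi : Int) :
    ∀ (L : List Int) (last : Int), (∀ j ∈ L, pvShallow lines fi j = false) →
    pvA_loop lines fi L last = (pvB_last lines L last, false) := by
  intro L
  induction L with
  | nil => intro last _; rfl
  | cons j rest ih =>
    intro last h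
    have hj := h j (List.mem_cons_self)
    have hrest : ∀ k ∈ rest, pvShallow lines fi k = false := fun k hk => h k (List.mem_cons_of_mem _ hk)
    simp only [pvShallow, Bool.and_eq_false_iff, Bool.not_eq_false', decide_eq_false_iff_not, not_le] at hj
    simp only [pvA_loop, pvB_last]
    rcases hj with hb | hl
    · simp [hb, ih _ hrest]
    · by_cases hb : pvBlank (pvLine lines j) = true
      · simp [hb, ih _ hrest]
      · simp [hb, hl, ih _ hrest]

-- A's loop breaks at the first shallow line, having tracked the last non-blank before it
theorem pvA_loop_break (lines : List String) (fi : Int) (b : Int) (T : List Int)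
    (hb : pvShallow lines fi b = true) :
    ∀ (P : List Int) (last : Int), (∀ j ∈ P, pvShallow lines fi j = false) →
    pvA_loop lines fi (P ++ b :: T) last = (pvB_last lines P last, true) := by
  intro P
  induction P with
  | nil =>
    intro last _
    simp only [pvShallow, Bool.and_eq_true, Bool.not_eq_true', decide_eq_true_eq] at hb
    simp [pvA_loop, pvB_last, hb.1, not_lt.mpr hb.2]
  | cons j rest ih =>
    intro last h
    have hj := h j (List.mem_cons_self)
    have hrest : ∀ k ∈ rest, pvShallow lines fi k = false := fun k hk => h k (List.mem_cons_of_mem _ hk)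
    simp only [pvShallow, Bool.and_eq_false_iff, Bool.not_eq_false', decide_eq_false_iff_not, not_le] at hj
    simp only [List.cons_append, pvA_loop, pvB_last]
    rcases hj with hbj | hl
    · simp [hbj, ih _ hrest]
    · by_cases hbj : pvBlank (pvLine lines j) = true
      · simp [hbj, ih _ hrest]
      · simp [hbj, hl, ih _ hrest]

-- pvB_end either finds no boundary (and returns n) or splits the list at the first boundary
theorem pvB_end_spec (lines : List String) (fi n : Int) :
    ∀ (L : List Int),
    (pvB_end lines fi n L = n ∧ ∀ j ∈ L, pvShallow lines fi j = false) ∨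
    (∃ P T, L = P ++ pvB_end lines fi n L :: T ∧
      pvShallow lines fi (pvB_end lines fi n L) = true ∧
      ∀ j ∈ P, pvShallow lines fi j = false) := by
  intro L
  induction L with
  | nil => exact Or.inl ⟨rfl, by simp⟩
  | cons j rest ih =>
    by_cases hj : pvShallow lines fi j = true
    · have hrec : pvB_end lines fi n (j :: rest) = j := by
        simp only [pvShallow, Bool.and_eq_true, decide_eq_true_eq] at hj
        simp [pvB_end, hj.1, hj.2]
      exact Or.inr ⟨[], rest, by rw [hrec]; simp, by rw [hrec]; exact hj, by simp⟩
    · have hrec : pvB_end lines fi n (j :: rest) = pvB_end lines fi n rest := by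
        simp only [pvShallow] at hj
        simp [pvB_end, hj]
      rcases ih with ⟨h1, h2⟩ | ⟨P, T, hsplit, hsh, hP⟩
      · refine Or.inl ⟨by rw [hrec, h1], ?_⟩
        intro k hk
        rcases List.mem_cons.mp hk with rfl | hk
        · simpa using hj
        · exact h2 k hk
      · refine Or.inr ⟨j :: P, T, ?_, by rw [hrec]; exact hsh, ?_⟩
        · rw [hrec, List.cons_append]
          exact congrArg (j :: ·) hsplit
        · intro k hk
          rcases List.mem_cons.mp hk with rfl | hk
          · simpa using hj
          · exact hP k hk

-- pvA_back is a "first match, else default" scan, hence compositional over append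
theorem pvA_back_append (lines : List String) :
    ∀ (X Y : List Int) (d : Int),
    pvA_back lines (X ++ Y) d = pvA_back lines X (pvA_back lines Y d) := by
  intro X Y d
  induction X with
  | nil => rfl
  | cons j rest ih =>
    simp only [List.cons_append, pvA_back]
    split <;> simp [ih]

-- the backward first-non-blank scan equals the forward last-non-blank fold
theorem pvA_back_reverse (lines : List String) :
    ∀ (L : List Int) (d : Int), pvA_back lines L.reverse d = pvB_last lines L d := by
  intro L
  induction L with
  | nil => intro d; rfl
  | cons j rest ih =>
    intro d
    rw [List.reverse_cons, pvA_back_append]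
    simp only [pvA_back, pvB_last]
    exact ih _

-- the last-non-blank fold either ignores its default, or is the identity on it
theorem pvB_last_cases (lines : List String) :
    ∀ (L : List Int) (d1 d2 : Int),
    pvB_last lines L d1 = pvB_last lines L d2 ∨
    (pvB_last lines L d1 = d1 ∧ pvB_last lines L d2 = d2) := by
  intro L
  induction L with
  | nil => intro d1 d2; exact Or.inr ⟨rfl, rfl⟩
  | cons j rest ih =>
    intro d1 d2
    simp only [pvB_last]
    by_cases hb : (!(pvBlank (pvLine lines j))) = true
    · simp [hb]
    · simp only [Bool.not_eq_true] at hb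
      simpa [hb] using ih d1 d2

theorem pvB_last_idem (lines : List String) (L : List Int) (d : Int) :
    pvB_last lines L (pvB_last lines L d) = pvB_last lines L d := by
  rcases pvB_last_cases lines L (pvB_last lines L d) d with h | ⟨h1, _⟩
  · exact h
  · exact h1

-- splitting a list at an element absent from both prefixes is unique
theorem split_at_unique {b : Int} :
    ∀ (X1 Y1 X2 Y2 : List Int), X1 ++ b :: Y1 = X2 ++ b :: Y2 →
    b ∉ X1 → b ∉ X2 → X1 = X2 := by
  intro X1
  induction X1 with
  | nil =>
    intro Y1 X2 Y2 heq _ hb2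
    cases X2 with
    | nil => rfl
    | cons x xs =>
      simp only [List.nil_append, List.cons_append, List.cons.injEq] at heq
      exact absurd (heq.1 ▸ List.mem_cons_self) hb2
  | cons x xs ih =>
    intro Y1 X2 Y2 heq hb1 hb2
    cases X2 with
    | nil =>
      simp only [List.cons_append, List.nil_append, List.cons.injEq] at heq
      exact absurd (heq.1 ▸ List.mem_cons_self) hb1
    | cons y ys =>
      simp only [List.cons_append, List.cons.injEq] at heq
      rw [heq.1, ih Y1 ys Y2 heq.2 (fun h => hb1 (List.mem_cons_of_mem _ h))
        (fun h => hb2 (List.mem_cons_of_mem _ h))]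

-- the two ports agree on every input (the ports themselves are total functions)
theorem pv_find_eq (lines : List String) (s fi : Int) :
    find_python_function_end_py lines s fi = find_python_function_end_py_alt lines s fi := by
  unfold find_python_function_end_py find_python_function_end_py_alt
  dsimp only
  rcases pvB_end_spec lines fi (lines.length : Int)
      (PySem.List.pyRange (s + 1) (lines.length : Int) 1) with
    ⟨he, hnone⟩ | ⟨P, T, hsplit, hsh, hP⟩
  · -- no boundary: A's loop completes, the walk-back is a no-op; B's region is all of R
    rw [pvA_loop_no_shallow lines fi _ s hnone, he]
    have hrev : PySem.List.pyRange ((lines.length : Int) - 1) s (-1)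
        = (PySem.List.pyRange (s + 1) (lines.length : Int) 1).reverse := by
      rw [PySem.List.pyRange_neg_one_eq_reverse]
      norm_num
    dsimp only
    rw [hrev, pvA_back_reverse, pvB_last_idem]
  · -- a boundary e exists: A's loop breaks there; B's region is exactly the prefix P
    generalize hgen : pvB_end lines fi (lines.length : Int)
      (PySem.List.pyRange (s + 1) (lines.length : Int) 1) = e at hsplit hsh ⊢
    have heR : e ∈ PySem.List.pyRange (s + 1) (lines.length : Int) 1 := by
      rw [hsplit]; simp
    obtain ⟨hlo, hhi⟩ := (PySem.List.mem_pyRange_one).mp heR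
    have hsplit2 : PySem.List.pyRange (s + 1) (lines.length : Int) 1
        = PySem.List.pyRange (s + 1) e 1 ++ e :: PySem.List.pyRange (e + 1) (lines.length : Int) 1 := by
      rw [PySem.List.pyRange_one_append (s + 1) e _ (by omega) (by omega)]
      congr 1
      exact PySem.List.pyRange_one_cons (by omega)
    have hbP : e ∉ P := by
      have hnd := PySem.List.nodup_pyRange_one (s + 1) ((lines.length : Int))
      rw [hsplit, List.nodup_append] at hnd
      intro h
      exact hnd.2.2 e h e List.mem_cons_self rfl
    have hbQ : e ∉ PySem.List.pyRange (s + 1) e 1 := by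
      intro h
      have := (PySem.List.mem_pyRange_one).mp h
      omega
    have hPeq := split_at_unique P T (PySem.List.pyRange (s + 1) e 1)
      (PySem.List.pyRange (e + 1) (lines.length : Int) 1) (hsplit.symm.trans hsplit2) hbP hbQ
    rw [hsplit, pvA_loop_break lines fi e T hsh P s hP]
    dsimp only
    rw [hPeq]

-- ===== VERDICT (by name: the statement is the Claim_ definition above) =====
theorem find_python_function_end_py_spec : Claim_equal_find_python_function_end_py := by
  intro lines s fi _ _
  exact pv_find_eq lines s fi
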